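-- pv_equiv track=rewrite | github.com/logpai/LogBench | src/Baselines/DeepLV/block_processing/block_processing.py | if_diff_levels
-- ===== SOURCE A (Python) =====
-- def if_diff_levels(value_list):
--     if len(value_list) > 1:
--         for i in range (0, len(value_list)-1):
--             for j in range (i+1, len(value_list)):
--                 if value_list[i][0] != value_list[j][0]:
--                     return 2
--     else:
--         return 0
--     return 1
-- ===== SOURCE B (Python) =====
-- def if_diff_levels(value_list):
--     if len(value_list) <= 1:
--         return 0
--     firsts = {x[0] for x in value_list}
--     return 2 if len(firsts) > 1 else 1
-- ===== Notes on version B (the rewrite author's own statement) =====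
-- stated objective: alternative
-- what changed: Replaced the nested all-pairs comparison of first components by a single pass that collects the distinct first components in a set and decides 0/1/2 from its cardinality.
-- outside the precondition, e.g. on if_diff_levels([[1], [2], []]): A returns 2, B raises IndexError
import Mathlib
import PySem

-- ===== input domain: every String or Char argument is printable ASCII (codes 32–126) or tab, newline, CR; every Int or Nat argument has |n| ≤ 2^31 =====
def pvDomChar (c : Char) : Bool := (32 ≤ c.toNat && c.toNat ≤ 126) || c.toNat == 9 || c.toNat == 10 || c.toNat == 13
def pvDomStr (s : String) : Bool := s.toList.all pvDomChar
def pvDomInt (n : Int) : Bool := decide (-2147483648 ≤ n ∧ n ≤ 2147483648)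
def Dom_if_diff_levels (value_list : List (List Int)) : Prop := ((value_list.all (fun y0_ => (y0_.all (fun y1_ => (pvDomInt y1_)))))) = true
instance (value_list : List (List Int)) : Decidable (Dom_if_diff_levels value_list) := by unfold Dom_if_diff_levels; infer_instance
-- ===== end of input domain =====

-- B replaces A's quadratic pairwise scan of first components by one pass collecting
-- the set of distinct first components and deciding 0/1/2 from its cardinality.

-- ===== PORT A =====
-- value_list[i][0]; exact for 0 ≤ k < len and nonempty inner list (guaranteed by Pre_)
def pvGet (vl : List (List Int)) (k : Int) : Int :=
  PySem.List.pyGetD (PySem.List.pyGetD vl k []) 0 0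

-- inner 'for j in range(i+1, len)' loop: true = 'return 2' taken
def pvInner (vl : List (List Int)) (i : Int) : List Int → Bool
  | [] => false
  | j :: js => if pvGet vl i ≠ pvGet vl j then true else pvInner vl i js

-- outer 'for i in range(0, len-1)' loop: falls through to 'return 1'
def pvOuter (vl : List (List Int)) : List Int → Int
  | [] => 1
  | i :: is =>
      if pvInner vl i (PySem.List.pyRange (i + 1) (vl.length : Int) 1) then 2
      else pvOuter vl is

def if_diff_levels (value_list : List (List Int)) : Int :=
  if value_list.length > 1 then
    pvOuter value_list (PySem.List.pyRange 0 ((value_list.length : Int) - 1) 1)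
  else 0

-- ===== PORT B =====
def if_diff_levels_alt (value_list : List (List Int)) : Int :=
  if value_list.length ≤ 1 then 0
  else if 1 < (PySem.Set.ofList (value_list.map (fun x => PySem.List.pyGetD x 0 0))).length
  then 2 else 1

-- ===== PRECONDITION & SPEC =====
-- Pre_ excludes lists of length ≥ 2 containing an empty inner list: Python A raises
-- IndexError there unless a differing pair is met first (then it returns 2), and B's
-- set build raises IndexError on any empty element.
def Pre_if_diff_levels (value_list : List (List Int)) : Prop :=
  value_list.length ≤ 1 ∨ ∀ l ∈ value_list, l ≠ []
instance (value_list : List (List Int)) : Decidable (Pre_if_diff_levels value_list) := by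
  unfold Pre_if_diff_levels; infer_instance

def pvWitness_if_diff_levels : List (List Int) := [[1], [2]]

def Spec_if_diff_levels (value_list : List (List Int)) (out : Int) : Prop :=
  out = if_diff_levels_alt value_list
instance (value_list : List (List Int)) (out : Int) : Decidable (Spec_if_diff_levels value_list out) := by
  unfold Spec_if_diff_levels; infer_instance

-- ===== CLAIM (what is proved, stated in full; the proofs are below) =====
def Claim_equal_if_diff_levels : Prop :=
  ∀ (value_list : List (List Int)), Dom_if_diff_levels value_list →
    Pre_if_diff_levels value_list →
    Spec_if_diff_levels value_list (if_diff_levels value_list)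

-- ===== LEMMAS AND PROOFS =====

-- heads list both sides are really about
def pvHeads (vl : List (List Int)) : List Int :=
  vl.map (fun x => PySem.List.pyGetD x 0 0)

theorem pvInner_eq_any (vl : List (List Int)) (i : Int) (js : List Int) :
    pvInner vl i js = js.any (fun j => pvGet vl i ≠ pvGet vl j) := by
  induction js with
  | nil => rfl
  | cons j js ih => by_cases h : pvGet vl i ≠ pvGet vl j <;> simp [pvInner, h, ih]

theorem pvOuter_eq_if (vl : List (List Int)) (is : List Int) :
    pvOuter vl is =
      if is.any (fun i => pvInner vl i (PySem.List.pyRange (i + 1) (vl.length : Int) 1)) then 2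
      else 1 := by
  induction is with
  | nil => rfl
  | cons i is ih =>
      by_cases h : pvInner vl i (PySem.List.pyRange (i + 1) (vl.length : Int) 1) = true <;>
        simp [pvOuter, h, ih]

theorem pvGet_eq_heads (vl : List (List Int)) (k : Int) (h0 : 0 ≤ k)
    (h1 : k < (vl.length : Int)) :
    pvGet vl k = (pvHeads vl).getD k.toNat 0 := by
  have hk : k.toNat < vl.length := by omega
  rw [pvGet, PySem.List.pyGetD_eq_getElem vl [] h0 (by exact_mod_cast h1)]
  simp [pvHeads, List.getD, List.getElem?_eq_getElem hk]

-- the two decision conditions coincide for lists of length ≥ 2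
theorem pv_cond_iff (vl : List (List Int)) (hlen : 2 ≤ vl.length) :
    ((PySem.List.pyRange 0 ((vl.length : Int) - 1) 1).any
        (fun i => pvInner vl i (PySem.List.pyRange (i + 1) (vl.length : Int) 1)) = true)
      ↔ ¬ ∀ a ∈ pvHeads vl, ∀ b ∈ pvHeads vl, a = b := by
  constructor
  · rintro h hall
    simp only [List.any_eq_true, pvInner_eq_any, PySem.List.mem_pyRange_one, ne_eq,
      decide_eq_true_eq] at h
    obtain ⟨i, ⟨hi0, hi1⟩, j, ⟨hj0, hj1⟩, hne⟩ := h
    apply hne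
    rw [pvGet_eq_heads vl i hi0 (by omega), pvGet_eq_heads vl j (by omega) hj1]
    have hi : i.toNat < (pvHeads vl).length := by simp [pvHeads]; omega
    have hj : j.toNat < (pvHeads vl).length := by simp [pvHeads]; omega
    rw [List.getD_eq_getElem _ _ hi, List.getD_eq_getElem _ _ hj]
    exact hall _ (List.getElem_mem hi) _ (List.getElem_mem hj)
  · intro h
    simp only [not_forall] at h
    obtain ⟨a, ha, b, hb, hab⟩ := h
    obtain ⟨ia, hia, rfl⟩ := List.getElem_of_mem ha
    obtain ⟨ib, hib, rfl⟩ := List.getElem_of_mem hb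
    have hlv : (pvHeads vl).length = vl.length := by simp [pvHeads]
    have hne' : ia ≠ ib := by rintro rfl; exact hab rfl
    simp only [List.any_eq_true, pvInner_eq_any, PySem.List.mem_pyRange_one, ne_eq,
      decide_eq_true_eq]
    rcases Nat.lt_or_ge ia ib with hlt | hge
    · refine ⟨(ia : Int), ⟨by omega, by omega⟩, (ib : Int), ⟨by omega, by omega⟩, ?_⟩
      rw [pvGet_eq_heads vl ia (by omega) (by omega),
          pvGet_eq_heads vl ib (by omega) (by omega)]
      simp only [Int.toNat_natCast, List.getD_eq_getElem _ _ hia, List.getD_eq_getElem _ _ hib]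
      exact hab
    · have hgt : ib < ia := by omega
      refine ⟨(ib : Int), ⟨by omega, by omega⟩, (ia : Int), ⟨by omega, by omega⟩, ?_⟩
      rw [pvGet_eq_heads vl ib (by omega) (by omega),
          pvGet_eq_heads vl ia (by omega) (by omega)]
      simp only [Int.toNat_natCast, List.getD_eq_getElem _ _ hia, List.getD_eq_getElem _ _ hib]
      exact fun he => hab he.symm

theorem pv_ofList_le_one_iff (xs : List Int) :
    (PySem.Set.ofList xs).length ≤ 1 ↔ ∀ a ∈ xs, ∀ b ∈ xs, a = b := by
  constructor
  · intro h a ha b hb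
    have ha' : a ∈ PySem.Set.ofList xs := (PySem.Set.mem_ofList _ _).2 ha
    have hb' : b ∈ PySem.Set.ofList xs := (PySem.Set.mem_ofList _ _).2 hb
    match hs : PySem.Set.ofList xs with
    | [] => rw [hs] at ha'; cases ha'
    | [x] =>
        rw [hs] at ha' hb'
        simp at ha' hb'; rw [ha', hb']
    | x :: y :: t => rw [hs] at h; simp at h
  · intro hall
    match hs : PySem.Set.ofList xs with
    | [] => simp
    | [x] => simp
    | x :: y :: t =>
        exfalso
        have hx : x ∈ xs := (PySem.Set.mem_ofList _ _).1 (by rw [hs]; simp)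
        have hy : y ∈ xs := (PySem.Set.mem_ofList _ _).1 (by rw [hs]; simp)
        have hnd := PySem.Set.nodup_ofList xs
        rw [hs] at hnd
        rcases List.nodup_cons.1 hnd with ⟨hx', -⟩
        exact hx' (by rw [hall _ hx _ hy]; simp)

-- ===== VERDICT (by name: the statement is the Claim_ definition above) =====
theorem if_diff_levels_spec : Claim_equal_if_diff_levels := by
  intro vl _ _
  unfold Spec_if_diff_levels if_diff_levels if_diff_levels_alt
  by_cases hlen : vl.length ≤ 1
  · have h0 : ¬ vl.length > 1 := by omega
    simp [hlen, h0]
  · have h2 : 2 ≤ vl.length := by omega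
    rw [if_pos (by omega), if_neg hlen, pvOuter_eq_if]
    by_cases hc : ((PySem.List.pyRange 0 ((vl.length : Int) - 1) 1).any
        (fun i => pvInner vl i (PySem.List.pyRange (i + 1) (vl.length : Int) 1)) = true)
    · rw [if_pos hc, if_pos ?_]
      have := (pv_cond_iff vl h2).1 hc
      have hle := (not_iff_not.2 (pv_ofList_le_one_iff (pvHeads vl))).2 this
      simp only [pvHeads] at hle; omega
    · rw [if_neg hc, if_neg ?_]
      have := (not_iff_not.2 (pv_cond_iff vl h2)).1 hc
      simp only [not_not] at this
      have hle := (pv_ofList_le_one_iff (pvHeads vl)).2 this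
      simp only [pvHeads] at hle; omega
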